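-- pv_equiv track=rewrite | github.com/gaodz-111/my_research | Re-Align/train_vir.py | get_subword_to_token_mapping
-- ===== SOURCE A (Python) =====
-- def get_subword_to_token_mapping(question_tokens, original_tokens, max_extra_chars=5):
--     mapping = [-1] * len(question_tokens)
--     visited = [False] * len(question_tokens)
--     qt_lower = [t.lower() for t in question_tokens]
--     L_question = len(question_tokens)
--
--     for i in range(L_question):
--         if visited[i]:
--             continue
--         matched = False
--         for ft_idx, ft in enumerate(original_tokens):
--             ft_lower = ft.lower()
--             max_span = min(L_question - i, len(ft_lower) + max_extra_chars)
--             for span in range(1, max_span + 1):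
--                 concat_tokens = "".join(qt_lower[i:i + span])
--                 if concat_tokens == ft_lower:
--                     for j in range(i, i + span):
--                         mapping[j] = ft_idx
--                         visited[j] = True
--                     matched = True
--                     break
--             if matched:
--                 break
--     return mapping
-- ===== SOURCE B (Python) =====
-- def get_subword_to_token_mapping(question_tokens, original_tokens, max_extra_chars=5):
--     qt_lower = [t.lower() for t in question_tokens]
--     n = len(qt_lower)
--     first_idx = {}
--     for idx, ft in enumerate(original_tokens):
--         first_idx.setdefault(ft.lower(), idx)
--     mapping = []
--     i = 0
--     while i < n:
--         best = None
--         concat = ""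
--         for span in range(1, n - i + 1):
--             concat += qt_lower[i + span - 1]
--             idx = first_idx.get(concat)
--             if idx is not None and span <= len(concat) + max_extra_chars and (best is None or idx < best[0]):
--                 best = (idx, span)
--         if best is None:
--             mapping.append(-1)
--             i += 1
--         else:
--             idx, span = best
--             mapping.extend([idx] * span)
--             i += span
--     return mapping
-- ===== Notes on version B (the rewrite author's own statement) =====
-- stated objective: faster
-- what changed: Replaces A's per-position rescan of every original token with re-joined slices (for each position: every token, every span, join of the slice) by a first-index dictionary over the lowered original tokens built once, plus one incrementally extended concatenation per position, and advances the position by the matched span instead of a visited array.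
import Mathlib
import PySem

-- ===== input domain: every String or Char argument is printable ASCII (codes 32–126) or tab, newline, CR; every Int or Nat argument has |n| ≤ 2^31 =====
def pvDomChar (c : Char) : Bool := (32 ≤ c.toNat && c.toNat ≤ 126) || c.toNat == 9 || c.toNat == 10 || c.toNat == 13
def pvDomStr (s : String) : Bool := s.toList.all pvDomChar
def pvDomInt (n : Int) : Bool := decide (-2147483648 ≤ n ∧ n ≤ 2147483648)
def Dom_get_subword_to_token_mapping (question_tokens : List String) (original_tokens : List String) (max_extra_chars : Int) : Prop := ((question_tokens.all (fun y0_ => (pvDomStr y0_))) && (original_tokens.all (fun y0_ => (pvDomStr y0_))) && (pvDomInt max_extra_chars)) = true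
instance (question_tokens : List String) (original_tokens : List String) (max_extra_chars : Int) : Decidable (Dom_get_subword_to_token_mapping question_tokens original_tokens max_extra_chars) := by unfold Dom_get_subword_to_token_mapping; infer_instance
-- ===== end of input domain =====

-- B replaces A's per-position scan over all original tokens and re-joined slices (O(L·F·S²)) by one
-- first-index dictionary over the lowered original tokens plus an incrementally grown concatenation
-- per position; objective: faster (asymptotic).
-- Strings are ported through List Char (PySem.Chars), exact on Dom's ASCII domain.

-- ===== PORT A =====
-- inner 'for span in …: if "".join(qt_lower[i:i+span]) == ft_lower: break' (break ⇒ Option recursion)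
def pvA_trySpans (q : List (List Char)) (i : Int) (fl : List Char) : List Int → Option Int
  | [] => none
  | span :: rest =>
      if PySem.Chars.join [] (PySem.List.slice q (some i) (some (i + span))) = fl then some span
      else pvA_trySpans q i fl rest

-- 'for ft_idx, ft in enumerate(original_tokens): …  if matched: break' (break ⇒ Option recursion)
def pvA_findTok (q : List (List Char)) (mec : Int) (i : Int) : List (Int × List Char) → Option (Int × Int)
  | [] => none
  | (ftIdx, ft) :: rest =>
      let fl := PySem.Chars.lower ft
      let maxSpan := min (PySem.List.len q - i) (PySem.List.len fl + mec)
      match pvA_trySpans q i fl (PySem.List.pyRange 1 (maxSpan + 1) 1) with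
      | some span => some (ftIdx, span)
      | none => pvA_findTok q mec i rest

-- 'for j in range(i, i+span): mapping[j] = ft_idx; visited[j] = True' (indices always in range: pySetD)
def pvA_mark (st : List Int × List Bool) (ftIdx : Int) (js : List Int) : List Int × List Bool :=
  js.foldl (fun st j => (PySem.List.pySetD st.1 j ftIdx, PySem.List.pySetD st.2 j true)) st

def get_subword_to_token_mapping (question_tokens : List String) (original_tokens : List String) (max_extra_chars : Int) : List Int :=
  let qt_lower := question_tokens.map (fun t => (PySem.Str.lower t).toList)
  let ot := original_tokens.map String.toList
  let L_question := PySem.List.len qt_lower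
  let init : List Int × List Bool :=
    (List.replicate question_tokens.length (-1), List.replicate question_tokens.length false)
  -- 'visited[i]' read with pyGetD: i is always in range here
  let final := (PySem.List.pyRange 0 L_question 1).foldl (fun st i =>
      if PySem.List.pyGetD st.2 i false then st
      else
        match pvA_findTok qt_lower max_extra_chars i (PySem.List.enumerate ot 0) with
        | none => st
        | some (ftIdx, span) => pvA_mark st ftIdx (PySem.List.pyRange i (i + span) 1)) init
  final.1

-- ===== PORT B =====
-- 'for idx, ft in enumerate(original_tokens): first_idx.setdefault(ft.lower(), idx)'
def pvB_buildDict : List (Int × List Char) → PySem.Dict (List Char) Int → PySem.Dict (List Char) Int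
  | [], d => d
  | (idx, ft) :: rest, d => pvB_buildDict rest (d.setdefault (PySem.Chars.lower ft) idx)

-- 'for span in …: concat += qt_lower[i+span-1]; idx = first_idx.get(concat); if …: best = (idx, span)'
def pvB_scan (d : PySem.Dict (List Char) Int) (q : List (List Char)) (mec : Int) (i : Int) :
    List Int → Option (Int × Int) → List Char → Option (Int × Int)
  | [], best, _ => best
  | span :: rest, best, concat =>
      let concat' := concat ++ PySem.List.pyGetD q (i + span - 1) []
      let best' :=
        match d.get? concat' with
        | none => best
        | some idx =>
            if decide (span ≤ PySem.List.len concat' + mec) &&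
               (match best with | none => true | some b => decide (idx < b.1)) then
              some (idx, span)
            else best
      pvB_scan d q mec i rest best' concat'

-- pvB_loop needs 1 ≤ span of a scan result for termination; proved here, above the def that cites it
theorem pvB_scan_span_pos (d : PySem.Dict (List Char) Int) (q : List (List Char)) (mec : Int) (i : Int) :
    ∀ (spans : List Int) (best : Option (Int × Int)) (concat : List Char),
    (∀ s ∈ spans, 1 ≤ s) → (∀ k s, best = some (k, s) → 1 ≤ s) →
    ∀ k s, pvB_scan d q mec i spans best concat = some (k, s) → 1 ≤ s := by
  intro spans
  induction spans with
  | nil => intro best concat _ hb k s hsome; exact hb k s hsome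
  | cons sp rest ih =>
      intro best concat hsp hb k s h
      refine ih _ _ (fun x hx => hsp x (List.mem_cons_of_mem _ hx)) ?_ k s h
      intro k' s'
      dsimp only
      cases hg : PySem.Dict.get? d (concat ++ PySem.List.pyGetD q (i + sp - 1) []) with
      | none => exact hb k' s'
      | some idx =>
          cases best with
          | none =>
              dsimp only
              split
              · intro hb'; cases hb'; exact hsp sp List.mem_cons_self
              · intro hb'; cases hb'
          | some b =>
              dsimp only
              split
              · intro hb'; cases hb'; exact hsp sp List.mem_cons_self
              · exact hb k' s'

-- 'while i < n: … i += 1 / i += span'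
def pvB_loop (d : PySem.Dict (List Char) Int) (q : List (List Char)) (mec : Int) (i : Int) : List Int :=
  if h : i < PySem.List.len q then
    match hm : pvB_scan d q mec i (PySem.List.pyRange 1 (PySem.List.len q - i + 1) 1) none [] with
    | none => (-1) :: pvB_loop d q mec (i + 1)
    | some (idx, span) => List.replicate span.toNat idx ++ pvB_loop d q mec (i + span)
  else []
termination_by (PySem.List.len q - i).toNat
decreasing_by
  · simp only [PySem.List.len_eq] at h ⊢; omega
  · have h1 : 1 ≤ span :=
      pvB_scan_span_pos d q mec i _ none []
        (fun x hx => ((PySem.List.mem_pyRange_one).1 hx).1) (by intro k s h; cases h) idx span hm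
    simp only [PySem.List.len_eq] at h ⊢; omega

def get_subword_to_token_mapping_alt (question_tokens : List String) (original_tokens : List String) (max_extra_chars : Int) : List Int :=
  let qt_lower := question_tokens.map (fun t => (PySem.Str.lower t).toList)
  let first_idx := pvB_buildDict (PySem.List.enumerate (original_tokens.map String.toList) 0) (PySem.Dict.mk [])
  pvB_loop first_idx qt_lower max_extra_chars 0

-- ===== PRECONDITION & SPEC =====
def Spec_get_subword_to_token_mapping (question_tokens : List String) (original_tokens : List String) (max_extra_chars : Int) (out : List Int) : Prop := out = get_subword_to_token_mapping_alt question_tokens original_tokens max_extra_chars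
instance (question_tokens : List String) (original_tokens : List String) (max_extra_chars : Int) (out : List Int) : Decidable (Spec_get_subword_to_token_mapping question_tokens original_tokens max_extra_chars out) := by unfold Spec_get_subword_to_token_mapping; infer_instance

-- ===== CLAIM (what is proved, stated in full; the proofs are below) =====
def Claim_equal_get_subword_to_token_mapping : Prop := ∀ (question_tokens : List String) (original_tokens : List String) (max_extra_chars : Int), Dom_get_subword_to_token_mapping question_tokens original_tokens max_extra_chars → Spec_get_subword_to_token_mapping question_tokens original_tokens max_extra_chars (get_subword_to_token_mapping question_tokens original_tokens max_extra_chars)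

-- ===== LEMMAS AND PROOFS =====

-- "".join(parts) is flatten
theorem pvJoin_nil_flatten (l : List (List Char)) : PySem.Chars.join [] l = l.flatten := by
  simp only [PySem.Chars.join, List.intercalate]
  induction l with
  | nil => rfl
  | cons x xs ih => cases xs <;> simp_all [List.intersperse]

-- the concatenation of the lowered question tokens q[i:i+s]
def pvCat (q : List (List Char)) (i s : Nat) : List Char := ((q.drop i).take s).flatten

theorem pvSliceCat (q : List (List Char)) (iN s : Nat) :
    PySem.Chars.join [] (PySem.List.slice q (some (iN : Int)) (some ((iN : Int) + (s : Int)))) = pvCat q iN s := by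
  rw [PySem.List.slice_natCast_add, pvJoin_nil_flatten]; rfl

theorem pvCat_succ (q : List (List Char)) (iN s : Nat) (h : iN + s < q.length) :
    pvCat q iN (s + 1) = pvCat q iN s ++ q.getD (iN + s) [] := by
  unfold pvCat
  rw [List.take_add_one, List.flatten_append]
  congr 1
  have h' : s < (q.drop iN).length := by simp; omega
  simp [List.getElem?_drop, List.getElem?_eq_getElem (by omega : iN + s < q.length), List.getD]

-- (k, s) is a match candidate at position i: span s ≥ 1 fits, concat equals the k-th lowered
-- original token, and the span respects the max_extra_chars bound
def pvCand (q lo : List (List Char)) (mec : Int) (i s k : Nat) : Prop :=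
  1 ≤ s ∧ i + s ≤ q.length ∧ k < lo.length ∧ pvCat q i s = lo.getD k [] ∧
    (s : Int) ≤ (lo.getD k []).length + mec

-- r is the candidate minimal in token index, then in span, among candidates with span ≤ s0
def pvInv (q lo : List (List Char)) (mec : Int) (i s0 : Nat) (r : Option (Int × Int)) : Prop :=
  match r with
  | none => ∀ s k, s ≤ s0 → ¬ pvCand q lo mec i s k
  | some (k, s) => ∃ kN sN : Nat, k = (kN : Int) ∧ s = (sN : Int) ∧ sN ≤ s0 ∧
      pvCand q lo mec i sN kN ∧
      (∀ k' s', s' ≤ s0 → pvCand q lo mec i s' k' → kN ≤ k') ∧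
      (∀ s', s' ≤ s0 → pvCand q lo mec i s' kN → sN ≤ s')

theorem pvInv_unique (q lo : List (List Char)) (mec : Int) (i s0 : Nat) (r r' : Option (Int × Int))
    (h : pvInv q lo mec i s0 r) (h' : pvInv q lo mec i s0 r') : r = r' := by
  cases r with
  | none =>
      cases r' with
      | none => rfl
      | some p =>
          obtain ⟨kN, sN, _, _, hs0, hc, _, _⟩ := h'
          exact absurd hc (h sN kN hs0)
  | some p =>
      cases r' with
      | none =>
          obtain ⟨kN, sN, _, _, hs0, hc, _, _⟩ := h
          exact absurd hc (h' sN kN hs0)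
      | some p' =>
          obtain ⟨kN, sN, hk, hs, hs0, hc, hmink, hmins⟩ := h
          obtain ⟨kN', sN', hk', hs', hs0', hc', hmink', hmins'⟩ := h'
          have hkk : kN = kN' := le_antisymm (hmink kN' sN' hs0' hc') (hmink' kN sN hs0 hc)
          subst hkk
          have hss : sN = sN' := le_antisymm (hmins sN' hs0' hc') (hmins' sN hs0 hc)
          cases p; cases p'; simp_all

-- pvA_trySpans is List.find? over the span list
theorem pvA_trySpans_eq_find? (q : List (List Char)) (i : Int) (fl : List Char) (l : List Int) :
    pvA_trySpans q i fl l
      = l.find? (fun s => decide (PySem.Chars.join [] (PySem.List.slice q (some i) (some (i + s))) = fl)) := by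
  induction l with
  | nil => rfl
  | cons s rest ih =>
      simp only [pvA_trySpans, List.find?]
      split_ifs with h <;> simp [h, ih]

theorem pvA_trySpans_none_iff (q : List (List Char)) (iN : Nat) (fl : List Char) (M : Int) :
    pvA_trySpans q (iN : Int) fl (PySem.List.pyRange 1 (M + 1) 1) = none ↔
      ∀ s : Nat, 1 ≤ s → (s : Int) ≤ M → pvCat q iN s ≠ fl := by
  rw [pvA_trySpans_eq_find?, List.find?_eq_none]
  constructor
  · intro h s h1 hM hc
    have hmem : (s : Int) ∈ PySem.List.pyRange 1 (M + 1) 1 :=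
      PySem.List.mem_pyRange_one.2 ⟨by exact_mod_cast h1, by omega⟩
    have h2 := h _ hmem
    rw [pvSliceCat] at h2
    simp [hc] at h2
  · intro h x hmem
    obtain ⟨hx1, hx2⟩ := PySem.List.mem_pyRange_one.1 hmem
    rw [show x = ((x.toNat : Nat) : Int) by omega, pvSliceCat]
    simpa using h x.toNat (by omega) (by omega)

theorem pvA_trySpans_some (q : List (List Char)) (iN : Nat) (fl : List Char) (M : Int) (sI : Int)
    (h : pvA_trySpans q (iN : Int) fl (PySem.List.pyRange 1 (M + 1) 1) = some sI) :
    ∃ sN : Nat, sI = (sN : Int) ∧ 1 ≤ sN ∧ (sN : Int) ≤ M ∧ pvCat q iN sN = fl ∧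
      ∀ s' : Nat, 1 ≤ s' → s' < sN → pvCat q iN s' ≠ fl := by
  rw [pvA_trySpans_eq_find?] at h
  obtain ⟨hs1, hs2⟩ := PySem.List.mem_pyRange_one.1 (List.mem_of_find?_eq_some h)
  have hp := List.find?_some h
  obtain ⟨-, l1, l2, hsplit, hfirst⟩ := List.find?_eq_some_iff_append.1 h
  refine ⟨sI.toNat, by omega, by omega, by omega, ?_, ?_⟩
  · rw [show sI = ((sI.toNat : Nat) : Int) by omega, pvSliceCat] at hp
    simpa using hp
  · intro s' h1 hlt hc
    have hmem' : (s' : Int) ∈ PySem.List.pyRange 1 (M + 1) 1 :=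
      PySem.List.mem_pyRange_one.2 ⟨by exact_mod_cast h1, by omega⟩
    rw [hsplit] at hmem'
    rcases List.mem_append.1 hmem' with hmem1 | hmem2
    · have := hfirst _ hmem1
      rw [pvSliceCat] at this
      simp [hc] at this
    · rcases List.mem_cons.1 hmem2 with heq | hmem3
      · omega
      · have hpw := PySem.List.pairwise_lt_pyRange_one 1 (M + 1)
        rw [hsplit] at hpw
        have := (List.pairwise_cons.1 (List.pairwise_append.1 hpw).2.1).1 _ hmem3
        omega

-- like pvInv, but for A's scan over token indices ≥ k0, spans unrestricted
def pvFromInv (q lo : List (List Char)) (mec : Int) (i k0 : Nat) (r : Option (Int × Int)) : Prop :=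
  match r with
  | none => ∀ s k, k0 ≤ k → ¬ pvCand q lo mec i s k
  | some (k, s) => ∃ kN sN : Nat, k = (kN : Int) ∧ s = (sN : Int) ∧ k0 ≤ kN ∧
      pvCand q lo mec i sN kN ∧
      (∀ k' s', k0 ≤ k' → pvCand q lo mec i s' k' → kN ≤ k') ∧
      (∀ s', pvCand q lo mec i s' kN → sN ≤ s')

theorem pvA_findTok_best (q : List (List Char)) (mec : Int) (iN : Nat)
    (lo : List (List Char)) :
    ∀ (otl : List (List Char)) (k0 : Nat), lo.drop k0 = otl.map PySem.Chars.lower →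
    pvFromInv q lo mec iN k0 (pvA_findTok q mec (iN : Int) (PySem.List.enumerate otl (k0 : Int))) := by
  intro otl
  induction otl with
  | nil =>
      intro k0 hdrop
      have hlen : lo.length ≤ k0 := by
        have := congrArg List.length hdrop
        simp only [List.length_drop, List.map_nil, List.length_nil] at this
        omega
      simp only [PySem.List.enumerate_nil, pvA_findTok, pvFromInv]
      intro s k hk hc
      have := hc.2.2.1
      omega
  | cons ft rest ih =>
      intro k0 hdrop
      have hk0 : k0 < lo.length := by
        have := congrArg List.length hdrop
        simp only [List.length_drop, List.map_cons, List.length_cons] at this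
        omega
      have hdropc : lo.drop k0 = PySem.Chars.lower ft :: rest.map PySem.Chars.lower := by
        simpa using hdrop
      have hget : lo.getD k0 [] = PySem.Chars.lower ft := by
        have h2 : lo.getD k0 [] = (lo.drop k0).getD 0 [] := by
          simp [List.getD, List.getElem?_drop]
        rw [h2, hdropc]; rfl
      have hdrop' : lo.drop (k0 + 1) = rest.map PySem.Chars.lower := by
        have : lo.drop (k0 + 1) = (lo.drop k0).drop 1 := by rw [List.drop_drop]
        rw [this, hdropc]; rfl
      have hcand : ∀ s : Nat, pvCand q lo mec iN s k0 ↔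
          (1 ≤ s ∧ (s : Int) ≤ min ((q.length : Int) - (iN : Int)) (((PySem.Chars.lower ft).length : Int) + mec) ∧
            pvCat q iN s = PySem.Chars.lower ft) := by
        intro s
        unfold pvCand
        constructor
        · rintro ⟨a, b, _, dd, e⟩
          rw [hget] at dd e
          exact ⟨a, by omega, dd⟩
        · rintro ⟨a, hM, dd⟩
          refine ⟨a, by omega, hk0, by rw [hget]; exact dd, by rw [hget]; omega⟩
      rw [PySem.List.enumerate_cons]
      simp only [pvA_findTok, PySem.List.len_eq]
      cases htr : pvA_trySpans q (iN : Int) (PySem.Chars.lower ft)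
          (PySem.List.pyRange 1 (min ((q.length : Int) - (iN : Int)) (((PySem.Chars.lower ft).length : Int) + mec) + 1) 1) with
      | some sI =>
          obtain ⟨sN, hsI, hs1, hsM, hmatch, hmin⟩ := pvA_trySpans_some _ _ _ _ _ htr
          refine ⟨k0, sN, rfl, hsI, le_refl _, (hcand sN).2 ⟨hs1, hsM, hmatch⟩, fun k' s' hk' _ => hk', ?_⟩
          intro s' hc'
          by_contra hlt
          obtain ⟨a, hM, dd⟩ := (hcand s').1 hc'
          exact hmin s' a (by omega) dd
      | none =>
          have hnone : ∀ s, ¬ pvCand q lo mec iN s k0 := by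
            intro s hc
            obtain ⟨a, hM, dd⟩ := (hcand s).1 hc
            exact (pvA_trySpans_none_iff _ _ _ _).1 htr s a hM dd
          have hrec := ih (k0 + 1) hdrop'
          rw [show ((k0 : Int) + 1) = ((k0 + 1 : Nat) : Int) by push_cast; ring]
          cases hr : pvA_findTok q mec (iN : Int) (PySem.List.enumerate rest ((k0 + 1 : Nat) : Int)) with
          | none =>
              rw [hr] at hrec
              intro s k hk hc
              rcases Nat.eq_or_lt_of_le hk with heq | hlt
              · exact hnone s (heq ▸ hc)
              · exact hrec s k hlt hc
          | some p =>
              rw [hr] at hrec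
              obtain ⟨kN, sN, h1, h2, h3, h4, h5, h6⟩ := hrec
              refine ⟨kN, sN, h1, h2, by omega, h4, ?_, h6⟩
              intro k' s' hk' hc'
              rcases Nat.eq_or_lt_of_le hk' with heq | hlt
              · exact absurd (heq ▸ hc') (hnone s')
              · exact h5 k' s' hlt hc'

theorem pvA_inner_best (q ot : List (List Char)) (mec : Int) (iN : Nat) (hi : iN < q.length) :
    pvInv q (ot.map PySem.Chars.lower) mec iN (q.length - iN)
      (pvA_findTok q mec (iN : Int) (PySem.List.enumerate ot 0)) := by
  have h := pvA_findTok_best q mec iN (ot.map PySem.Chars.lower) ot 0 (by simp)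
  rw [show ((0 : Nat) : Int) = 0 by simp] at h
  cases hr : pvA_findTok q mec (iN : Int) (PySem.List.enumerate ot 0) with
  | none =>
      rw [hr] at h
      intro s k _ hc
      exact h s k (Nat.zero_le _) hc
  | some p =>
      rw [hr] at h
      obtain ⟨kN, sN, h1, h2, _, h4, h5, h6⟩ := h
      exact ⟨kN, sN, h1, h2, by have := h4.1; have := h4.2.1; omega, h4,
        fun k' s' _ hc' => h5 k' s' (Nat.zero_le _) hc', fun s' _ hc' => h6 s' hc'⟩

-- the first-index dictionary: lookup is the first index of key among the lowered tokens
theorem pvB_buildDict_get? (key : List Char) :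
    ∀ (otl : List (List Char)) (k0 : Nat) (d : PySem.Dict (List Char) Int),
    (pvB_buildDict (PySem.List.enumerate otl (k0 : Int)) d).get? key
      = (d.get? key).or ((PySem.List.index? (otl.map PySem.Chars.lower) key).map (fun j => Int.ofNat (k0 + j))) := by
  intro otl
  induction otl with
  | nil =>
      intro k0 d
      simp [PySem.List.enumerate_nil, pvB_buildDict]
  | cons ft rest ih =>
      intro k0 d
      rw [PySem.List.enumerate_cons]
      simp only [pvB_buildDict, List.map_cons]
      rw [show ((k0 : Int) + 1) = ((k0 + 1 : Nat) : Int) by push_cast; ring]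
      rw [ih]
      by_cases hk : PySem.Chars.lower ft = key
      · subst hk
        rw [PySem.List.index?_cons_self]
        rw [PySem.Dict.get?_setdefault_self]
        cases hd : d.get? (PySem.Chars.lower ft) <;> simp [Option.or]
      · rw [PySem.List.index?_cons_of_ne _ hk]
        rw [PySem.Dict.get?_setdefault_of_ne _ _ (fun h => hk h.symm)]
        cases PySem.List.index? (rest.map PySem.Chars.lower) key with
        | none => simp [Option.or]
        | some j =>
            cases d.get? key <;> simp [Option.or] <;> omega

theorem pvB_dict_get? (ot : List (List Char)) (key : List Char) :
    (pvB_buildDict (PySem.List.enumerate ot 0) (PySem.Dict.mk [])).get? key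
      = (PySem.List.index? (ot.map PySem.Chars.lower) key).map Int.ofNat := by
  have h := pvB_buildDict_get? key ot 0 (PySem.Dict.mk [])
  rw [show ((0 : Nat) : Int) = 0 by simp] at h
  rw [h]
  cases hj : PySem.List.index? (ot.map PySem.Chars.lower) key
  all_goals simp_all [PySem.Dict.get?, Option.or]

theorem pvInv_extend (q lo : List (List Char)) (mec : Int) (iN s0 : Nat) (best : Option (Int × Int))
    (h : pvInv q lo mec iN s0 best) (hno : ∀ k, ¬ pvCand q lo mec iN (s0 + 1) k) :
    pvInv q lo mec iN (s0 + 1) best := by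
  cases best with
  | none =>
      intro s k hs hc
      rcases Nat.lt_or_ge s (s0 + 1) with hlt | hge
      · exact h s k (by omega) hc
      · have hseq : s = s0 + 1 := by omega
        subst hseq
        exact hno k hc
  | some p =>
      obtain ⟨kN, sN, h1, h2, h3, h4, h5, h6⟩ := h
      refine ⟨kN, sN, h1, h2, by omega, h4, ?_, ?_⟩
      · intro k' s' hs' hc'
        rcases Nat.lt_or_ge s' (s0 + 1) with hlt | hge
        · exact h5 k' s' (by omega) hc'
        · have hseq : s' = s0 + 1 := by omega
          subst hseq
          exact absurd hc' (hno k')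
      · intro s' hs' hc'
        rcases Nat.lt_or_ge s' (s0 + 1) with hlt | hge
        · exact h6 s' (by omega) hc'
        · have hseq : s' = s0 + 1 := by omega
          subst hseq
          exact absurd hc' (hno kN)

theorem pvB_scan_inv (q ot : List (List Char)) (mec : Int) (iN : Nat) :
    ∀ (cnt s0 : Nat) (best : Option (Int × Int)),
    iN + s0 + cnt ≤ q.length →
    pvInv q (ot.map PySem.Chars.lower) mec iN s0 best →
    pvInv q (ot.map PySem.Chars.lower) mec iN (s0 + cnt)
      (pvB_scan (pvB_buildDict (PySem.List.enumerate ot 0) (PySem.Dict.mk [])) q mec (iN : Int)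
        (PySem.List.pyRange ((s0 : Int) + 1) ((s0 : Int) + 1 + (cnt : Int)) 1) best (pvCat q iN s0)) := by
  intro cnt
  induction cnt with
  | zero =>
      intro s0 best hle hinv
      rw [PySem.List.pyRange_one_eq_nil (by omega)]
      simpa using hinv
  | succ c ihc =>
      intro s0 best hle hinv
      have hq : iN + s0 < q.length := by omega
      rw [PySem.List.pyRange_one_cons (by push_cast; omega)]
      simp only [pvB_scan]
      have hconcat : pvCat q iN s0 ++ PySem.List.pyGetD q ((iN : Int) + ((s0 : Int) + 1) - 1) []
          = pvCat q iN (s0 + 1) := by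
        rw [show (iN : Int) + ((s0 : Int) + 1) - 1 = ((iN + s0 : Nat) : Int) by push_cast; ring,
            PySem.List.pyGetD_natCast, pvCat_succ q iN s0 hq]
      rw [hconcat]
      rw [show s0 + (c + 1) = (s0 + 1) + c by omega,
          show ((s0 : Int) + 1 + ((c + 1 : Nat) : Int)) = (((s0 + 1 : Nat) : Int)) + 1 + (c : Int) by push_cast; ring,
          show ((s0 : Int) + 1 + 1) = (((s0 + 1 : Nat) : Int)) + 1 by push_cast; ring]
      rw [pvB_dict_get? ot (pvCat q iN (s0 + 1))]
      simp only [PySem.List.len_eq]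
      cases hg : PySem.List.index? (ot.map PySem.Chars.lower) (pvCat q iN (s0 + 1)) with
      | none =>
          have hno : ∀ k, ¬ pvCand q (ot.map PySem.Chars.lower) mec iN (s0 + 1) k := by
            intro k hc
            obtain ⟨-, -, hklen, hval, -⟩ := hc
            rw [PySem.List.index?_eq_none_iff] at hg
            apply hg
            rw [hval, List.getD_eq_getElem _ _ hklen]
            exact List.getElem_mem hklen
          exact ihc (s0 + 1) best (by omega) (pvInv_extend _ _ _ _ _ _ hinv hno)
      | some j =>
          rw [Option.map_some]
          dsimp only
          obtain ⟨hjlen, hjval, hjmin⟩ := PySem.List.getElem_of_index?_eq_some hg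
          have hgetj : (ot.map PySem.Chars.lower).getD j [] = pvCat q iN (s0 + 1) := by
            rw [List.getD_eq_getElem _ _ hjlen]; exact hjval
          by_cases hcb : ((s0 : Int) + 1 ≤ ((pvCat q iN (s0 + 1)).length : Int) + mec)
          · have hcand_j : pvCand q (ot.map PySem.Chars.lower) mec iN (s0 + 1) j :=
              ⟨by omega, by omega, hjlen, hgetj.symm, by rw [hgetj]; push_cast; omega⟩
            have hminj : ∀ k, pvCand q (ot.map PySem.Chars.lower) mec iN (s0 + 1) k → j ≤ k := by
              intro k hc
              by_contra hlt
              obtain ⟨-, -, hklen, hval, -⟩ := hc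
              exact hjmin k (by omega) (by rw [List.getD_eq_getElem _ _ hklen] at hval; exact hval.symm)
            cases best with
            | none =>
                rw [if_pos (by simp [hcb])]
                refine ihc (s0 + 1) _ (by omega) ?_
                refine ⟨j, s0 + 1, rfl, by push_cast; ring, le_refl _, hcand_j, ?_, ?_⟩
                · intro k' s' hs' hc'
                  rcases Nat.lt_or_ge s' (s0 + 1) with hlt | hge
                  · exact absurd hc' (hinv s' k' (by omega))
                  · have hseq : s' = s0 + 1 := by omega
                    subst hseq
                    exact hminj k' hc'
                · intro s' hs' hc'
                  rcases Nat.lt_or_ge s' (s0 + 1) with hlt | hge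
                  · exact absurd hc' (hinv s' j (by omega))
                  · omega
            | some p =>
                obtain ⟨p1, p2⟩ := p
                obtain ⟨k0N, s0N, hk0, hs0', h3, h4, h5, h6⟩ := hinv
                by_cases hjk : ((j : Int) < p1)
                · have hjk' : j < k0N := by rw [hk0] at hjk; exact_mod_cast hjk
                  rw [if_pos (by simp [hcb]; omega)]
                  refine ihc (s0 + 1) _ (by omega) ?_
                  refine ⟨j, s0 + 1, rfl, by push_cast; ring, le_refl _, hcand_j, ?_, ?_⟩
                  · intro k' s' hs' hc'
                    rcases Nat.lt_or_ge s' (s0 + 1) with hlt | hge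
                    · have := h5 k' s' (by omega) hc'
                      omega
                    · have hseq : s' = s0 + 1 := by omega
                      subst hseq
                      exact hminj k' hc'
                  · intro s' hs' hc'
                    rcases Nat.lt_or_ge s' (s0 + 1) with hlt | hge
                    · have := h5 j s' (by omega) hc'
                      omega
                    · omega
                · have hjk' : k0N ≤ j := by rw [hk0] at hjk; omega
                  rw [if_neg (by simp [hcb]; omega)]
                  refine ihc (s0 + 1) _ (by omega) ?_
                  refine ⟨k0N, s0N, hk0, hs0', by omega, h4, ?_, ?_⟩
                  · intro k' s' hs' hc'
                    rcases Nat.lt_or_ge s' (s0 + 1) with hlt | hge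
                    · exact h5 k' s' (by omega) hc'
                    · have hseq : s' = s0 + 1 := by omega
                      subst hseq
                      have := hminj k' hc'
                      omega
                  · intro s' hs' hc'
                    rcases Nat.lt_or_ge s' (s0 + 1) with hlt | hge
                    · exact h6 s' (by omega) hc'
                    · omega
          · have hno : ∀ k, ¬ pvCand q (ot.map PySem.Chars.lower) mec iN (s0 + 1) k := by
              intro k hc
              obtain ⟨-, -, hklen, hval, hbound⟩ := hc
              rw [← hval] at hbound
              push_cast at hbound
              omega
            rw [if_neg (by simp [hcb])]
            exact ihc (s0 + 1) best (by omega) (pvInv_extend _ _ _ _ _ _ hinv hno)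

theorem pvB_inner_best (q ot : List (List Char)) (mec : Int) (iN : Nat) (hi : iN < q.length) :
    pvInv q (ot.map PySem.Chars.lower) mec iN (q.length - iN)
      (pvB_scan (pvB_buildDict (PySem.List.enumerate ot 0) (PySem.Dict.mk [])) q mec (iN : Int)
        (PySem.List.pyRange 1 (PySem.List.len q - (iN : Int) + 1) 1) none []) := by
  have h := pvB_scan_inv q ot mec iN (q.length - iN) 0 none (by omega)
    (fun s k hs hc => absurd hc.1 (by omega))
  rw [show ((0 : Nat) : Int) + 1 = 1 by simp] at h
  rw [show ((1 : Int) + ((q.length - iN : Nat) : Int)) = (PySem.List.len q - (iN : Int) + 1) by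
    simp only [PySem.List.len_eq]
    rw [Nat.cast_sub (le_of_lt hi)]
    ring] at h
  rw [show 0 + (q.length - iN) = q.length - iN by omega] at h
  exact h

theorem pvA_mark_append_singleton (st : List Int × List Bool) (k j : Int) (js : List Int) :
    pvA_mark st k (js ++ [j])
      = (PySem.List.pySetD (pvA_mark st k js).1 j k, PySem.List.pySetD (pvA_mark st k js).2 j true) := by
  simp [pvA_mark, List.foldl_append]

-- marking range(a, a+cnt) patches both state lists on [a, a+cnt)
theorem pvA_mark_spec (k : Int) :
    ∀ (cnt a : Nat) (m : List Int) (v : List Bool),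
    a + cnt ≤ m.length → a + cnt ≤ v.length →
    pvA_mark (m, v) k (PySem.List.pyRange (a : Int) ((a : Int) + (cnt : Int)) 1)
      = (m.take a ++ List.replicate cnt k ++ m.drop (a + cnt),
         v.take a ++ List.replicate cnt true ++ v.drop (a + cnt)) := by
  intro cnt
  induction cnt with
  | zero =>
      intro a m v hm hv
      rw [show (a : Int) + ((0 : Nat) : Int) = (a : Int) by simp,
          PySem.List.pyRange_one_eq_nil (le_refl _)]
      simp [pvA_mark]
  | succ c ih =>
      intro a m v hm hv
      rw [show ((a : Int) + ((c + 1 : Nat) : Int)) = ((a : Int) + (c : Nat) + 1) by push_cast; ring,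
          PySem.List.pyRange_one_succ_right (by omega)]
      rw [pvA_mark_append_singleton, ih a m v (by omega) (by omega)]
      have hset : ∀ {α : Type} (l : List α) (x y : α), a + c ≤ l.length → a + c + 1 ≤ l.length →
          (l.take a ++ List.replicate c x ++ l.drop (a + c)).set (a + c) x
            = l.take a ++ List.replicate (c + 1) x ++ l.drop (a + c + 1) := by
        intro α l x y hle hlt
        rw [List.append_assoc, List.set_append,
            if_neg (by simp only [List.length_take]; omega),
            List.set_append,
            if_neg (by simp only [List.length_take, List.length_replicate]; omega)]
        rw [List.drop_eq_getElem_cons (show a + c < l.length by omega)]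
        simp only [List.length_take, List.length_replicate]
        rw [show a + c - min a l.length - c = 0 by omega]
        simp only [List.set_cons_zero]
        rw [List.replicate_succ']
        simp [List.append_assoc]
      rw [show ((a : Int) + (c : Nat)) = ((a + c : Nat) : Int) by push_cast; ring]
      rw [PySem.List.pySetD_natCast, PySem.List.pySetD_natCast]
      dsimp only
      rw [hset m k k (by omega) (by omega), hset v true true (by omega) (by omega)]
      rw [show a + (c + 1) = a + c + 1 by omega]

theorem pvGetD_patch {α : Type} (m : List α) (a cnt : Nat) (x d : α) (j : Nat)
    (h : a + cnt ≤ m.length) :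
    (m.take a ++ List.replicate cnt x ++ m.drop (a + cnt)).getD j d
      = if a ≤ j ∧ j < a + cnt then x else m.getD j d := by
  have hta : (m.take a).length = a := by simp; omega
  simp only [List.getD, List.append_assoc]
  rcases Nat.lt_or_ge j a with h1 | h1
  · rw [if_neg (by omega), List.getElem?_append_left (by omega : j < (m.take a).length)]
    congr 1
    exact List.getElem?_take_of_lt h1
  · rw [List.getElem?_append_right (by omega : (m.take a).length ≤ j), hta]
    rcases Nat.lt_or_ge j (a + cnt) with h2 | h2
    · rw [if_pos (by omega), List.getElem?_append_left (by simp; omega), List.getElem?_replicate_of_lt (by omega)]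
      rfl
    · rw [if_neg (by omega), List.getElem?_append_right (by simp; omega), List.length_replicate,
          List.getElem?_drop]
      congr 2
      omega

theorem pvFold_skip (q ot : List (List Char)) (mec : Int) :
    ∀ (l : List Int) (st : List Int × List Bool),
    (∀ j ∈ l, PySem.List.pyGetD st.2 j false = true) →
    l.foldl (fun st i =>
      if PySem.List.pyGetD st.2 i false then st
      else match pvA_findTok q mec i (PySem.List.enumerate ot 0) with
        | none => st
        | some (ftIdx, span) => pvA_mark st ftIdx (PySem.List.pyRange i (i + span) 1)) st = st := by
  intro l
  induction l with
  | nil => intro st _; rfl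
  | cons x xs ih =>
      intro st h
      simp only [List.foldl_cons, h x List.mem_cons_self, if_true]
      exact ih st (fun j hj => h j (List.mem_cons_of_mem _ hj))

theorem pvB_loop_end (d : PySem.Dict (List Char) Int) (q : List (List Char)) (mec : Int) (i : Int)
    (h : ¬ i < PySem.List.len q) : pvB_loop d q mec i = [] := by
  rw [pvB_loop, dif_neg h]

theorem pvB_loop_none (d : PySem.Dict (List Char) Int) (q : List (List Char)) (mec : Int) (i : Int)
    (h : i < PySem.List.len q)
    (hs : pvB_scan d q mec i (PySem.List.pyRange 1 (PySem.List.len q - i + 1) 1) none [] = none) :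
    pvB_loop d q mec i = (-1) :: pvB_loop d q mec (i + 1) := by
  rw [pvB_loop, dif_pos h]
  split
  · rfl
  · rename_i idx span heq
    rw [hs] at heq
    cases heq

theorem pvB_loop_some (d : PySem.Dict (List Char) Int) (q : List (List Char)) (mec : Int) (i : Int)
    (idx span : Int) (h : i < PySem.List.len q)
    (hs : pvB_scan d q mec i (PySem.List.pyRange 1 (PySem.List.len q - i + 1) 1) none [] = some (idx, span)) :
    pvB_loop d q mec i = List.replicate span.toNat idx ++ pvB_loop d q mec (i + span) := by
  rw [pvB_loop, dif_pos h]
  split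
  · rename_i heq
    rw [hs] at heq
    cases heq
  · rename_i idx' span' heq
    rw [hs] at heq
    cases heq
    rfl

theorem pvOuter (q ot : List (List Char)) (mec : Int) :
    ∀ (cnt iN : Nat) (m : List Int) (v : List Bool), m.length = q.length → v.length = q.length →
    iN + cnt = q.length →
    (∀ j, iN ≤ j → j < q.length → v.getD j false = false) →
    (∀ j, iN ≤ j → j < q.length → m.getD j 0 = -1) →
    ((PySem.List.pyRange (iN : Int) (q.length : Int) 1).foldl (fun st i =>
      if PySem.List.pyGetD st.2 i false then st
      else
        match pvA_findTok q mec i (PySem.List.enumerate ot 0) with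
        | none => st
        | some (ftIdx, span) => pvA_mark st ftIdx (PySem.List.pyRange i (i + span) 1)) (m, v)).1
    = m.take iN ++ pvB_loop (pvB_buildDict (PySem.List.enumerate ot 0) (PySem.Dict.mk [])) q mec (iN : Int) := by
  intro cnt
  induction cnt using Nat.strong_induction_on with
  | _ cnt ih =>
  intro iN m v hm hv hcnt hvf hmf
  rcases Nat.eq_zero_or_pos cnt with h0 | hpos
  · subst h0
    rw [PySem.List.pyRange_one_eq_nil (by omega)]
    rw [pvB_loop_end _ _ _ _ (by simp only [PySem.List.len_eq]; omega)]
    simp [List.take_of_length_le (by omega : m.length ≤ iN)]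
  · have hiN : iN < q.length := by omega
    rw [PySem.List.pyRange_one_cons (by omega)]
    simp only [List.foldl_cons]
    rw [PySem.List.pyGetD_natCast, hvf iN (le_refl _) hiN]
    simp only [Bool.false_eq_true, if_false]
    have hAB := pvInv_unique _ _ _ _ _ _ _ (pvB_inner_best q ot mec iN hiN) (pvA_inner_best q ot mec iN hiN)
    cases hfa : pvA_findTok q mec (iN : Int) (PySem.List.enumerate ot 0) with
    | none =>
        rw [hfa] at hAB
        have hloop := pvB_loop_none _ q mec (iN : Int) (by simp only [PySem.List.len_eq]; exact_mod_cast hiN) hAB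
        rw [hloop]
        have hrec := ih (cnt - 1) (by omega) (iN + 1) m v hm hv (by omega)
          (fun j hj hjlen => hvf j (by omega) hjlen) (fun j hj hjlen => hmf j (by omega) hjlen)
        rw [show ((iN : Int) + 1) = ((iN + 1 : Nat) : Int) by push_cast; ring]
        rw [hrec]
        have hmi : m[iN]? = some (-1) := by
          have h2 := hmf iN (le_refl _) hiN
          rw [List.getD_eq_getElem?_getD, List.getElem?_eq_getElem (show iN < m.length by omega)] at h2
          simp only [Option.getD_some] at h2
          rw [List.getElem?_eq_getElem (show iN < m.length by omega), h2]
        rw [List.take_add_one, hmi]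
        simp
    | some p =>
        obtain ⟨ftIdx, span⟩ := p
        rw [hfa] at hAB
        have hInv := pvA_inner_best q ot mec iN hiN
        rw [hfa] at hInv
        obtain ⟨kN, sN, hk, hsp, hs0, hcand, -, -⟩ := hInv
        have hs1 : 1 ≤ sN := hcand.1
        have hsle : iN + sN ≤ q.length := hcand.2.1
        subst hk hsp
        have hmark := pvA_mark_spec (kN : Int) sN iN m v (by omega) (by omega)
        dsimp only
        rw [hmark]
        rw [PySem.List.pyRange_one_append ((iN : Int) + 1) ((iN + sN : Nat) : Int) (q.length : Int)
          (by push_cast; omega) (by push_cast; omega), List.foldl_append]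
        rw [pvFold_skip q ot mec (PySem.List.pyRange ((iN : Int) + 1) ((iN + sN : Nat) : Int) 1) _ ?skip]
        case skip =>
          intro j hj
          obtain ⟨hj1, hj2⟩ := PySem.List.mem_pyRange_one.1 hj
          rw [show j = ((j.toNat : Nat) : Int) by omega, PySem.List.pyGetD_natCast]
          rw [pvGetD_patch v iN sN true false j.toNat (by omega)]
          rw [if_pos (by omega)]
        have hrec := ih (cnt - sN) (by omega) (iN + sN)
          (m.take iN ++ List.replicate sN (kN : Int) ++ m.drop (iN + sN))
          (v.take iN ++ List.replicate sN true ++ v.drop (iN + sN))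
          (by simp; omega) (by simp; omega) (by omega)
          (fun j hj hjlen => by
            rw [pvGetD_patch v iN sN true false j (by omega), if_neg (by omega)]
            exact hvf j (by omega) hjlen)
          (fun j hj hjlen => by
            rw [pvGetD_patch m iN sN (kN : Int) 0 j (by omega), if_neg (by omega)]
            exact hmf j (by omega) hjlen)
        rw [hrec]
        have htake : (m.take iN ++ List.replicate sN (kN : Int) ++ m.drop (iN + sN)).take (iN + sN)
            = m.take iN ++ List.replicate sN (kN : Int) := by
          rw [List.take_append_of_le_length
                (by simp only [List.length_append, List.length_take, List.length_replicate]; omega)]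
          rw [List.take_of_length_le
                (by simp only [List.length_append, List.length_take, List.length_replicate]; omega)]
        rw [htake]
        have hloop := pvB_loop_some _ q mec (iN : Int) (kN : Int) (sN : Int)
          (by simp only [PySem.List.len_eq]; exact_mod_cast hiN) hAB
        rw [hloop]
        rw [show ((iN : Int) + ((sN : Nat) : Int)) = ((iN + sN : Nat) : Int) by push_cast; ring]
        simp [List.append_assoc, Int.toNat_natCast]

-- ===== VERDICT (by name: the statement is the Claim_ definition above) =====
theorem get_subword_to_token_mapping_spec : Claim_equal_get_subword_to_token_mapping := by
  intro qt ot mec _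
  unfold Spec_get_subword_to_token_mapping get_subword_to_token_mapping get_subword_to_token_mapping_alt
  dsimp only
  have h := pvOuter (qt.map (fun t => (PySem.Str.lower t).toList)) (ot.map String.toList) mec
      (qt.map (fun t => (PySem.Str.lower t).toList)).length 0
      (List.replicate qt.length (-1)) (List.replicate qt.length false)
      (by simp) (by simp) (by simp)
      (fun j hj hjlen => by
        rw [List.getD_eq_getElem _ _ (by simpa using hjlen)]
        simp)
      (fun j hj hjlen => by
        rw [List.getD_eq_getElem _ _ (by simpa using hjlen)]
        simp)
  rw [show (((0 : Nat)) : Int) = 0 by simp] at h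
  simp only [List.take_zero, List.nil_append] at h
  simp only [PySem.List.len_eq]
  exact h
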